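-- pv_equiv track=rewrite | github.com/dudamarlena/pyc_source | pycfiles/pycopa-0.3.tar/variables.py | needsResolve
-- ===== SOURCE A (Python) =====
-- def needsResolve(expr):
--     if expr is None or len(expr) == 0:
--         return False
--     if expr[0] == '{':
--         return True
--     if len(expr) < 2:
--         return False
--     pos = 1
--     pos = expr.find('{', pos)
--     while pos != -1:
--         if expr[(pos - 1)] != '\\':
--             return True
--         pos = expr.find('{', pos + 1)
--
--     return False
-- ===== SOURCE B (Python) =====
-- def needsResolve(expr):
--     if not expr:
--         return False
--     return expr.count('{') > expr.count('\\{')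
-- ===== Notes on version B (the rewrite author's own statement) =====
-- stated objective: simpler
-- what changed: A's find-loop scanning for the first unescaped opening brace is replaced by a counting identity: B compares the total number of opening braces with the number of backslash-then-brace two-character occurrences (which cannot overlap), and an unescaped brace exists iff the first count is strictly larger.
import Mathlib
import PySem

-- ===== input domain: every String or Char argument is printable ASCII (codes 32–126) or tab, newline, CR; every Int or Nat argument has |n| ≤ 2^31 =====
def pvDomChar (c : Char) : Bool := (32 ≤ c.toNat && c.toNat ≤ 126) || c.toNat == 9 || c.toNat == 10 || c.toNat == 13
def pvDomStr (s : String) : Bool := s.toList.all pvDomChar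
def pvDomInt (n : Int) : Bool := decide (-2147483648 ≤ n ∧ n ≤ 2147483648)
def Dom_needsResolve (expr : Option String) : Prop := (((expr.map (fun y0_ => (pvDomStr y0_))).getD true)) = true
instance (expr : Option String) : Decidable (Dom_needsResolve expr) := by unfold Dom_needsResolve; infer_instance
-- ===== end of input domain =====

-- B replaces A's find-loop for the first unescaped '{' by a simpler counting test: count('{') > count('\{').


-- ===== PORT A =====
-- A's while loop: pos = expr.find('{', st); if found and expr[pos-1] != '\\' return True,
-- else continue from pos+1.  fuel only makes the recursion structural; the call site
-- passes enough fuel for all iterations.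
def needsResolveGo (cs : List Char) (fuel : Nat) (st : Nat) : Bool :=
  match fuel with
  | 0 => false
  | fuel + 1 =>
    let p := PySem.Chars.findFrom cs ['{'] (st : Int)
    if p = -1 then false
    else if PySem.List.pyGet? cs (p - 1) ≠ some '\\' then true
    else needsResolveGo cs fuel (p.toNat + 1)

def needsResolve (expr : Option String) : Bool :=
  match expr with
  | none => false
  | some s =>
    let cs := s.toList
    if cs.length = 0 then false
    else if PySem.List.pyGet? cs 0 = some '{' then true
    else if cs.length < 2 then false
    else needsResolveGo cs (cs.length + 1) 1

-- ===== PORT B =====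
-- Source B: if not expr: return False; return expr.count('{') > expr.count('\{')
def needsResolve_alt (expr : Option String) : Bool :=
  match expr with
  | none => false
  | some s =>
    if s.toList.isEmpty then false
    else decide (PySem.Chars.count s.toList ['\\', '{'] < PySem.Chars.count s.toList ['{'])

-- ===== PRECONDITION & SPEC =====
def Spec_needsResolve (expr : Option String) (out : Bool) : Prop := out = needsResolve_alt expr
instance (expr : Option String) (out : Bool) : Decidable (Spec_needsResolve expr out) := by unfold Spec_needsResolve; infer_instance

-- ===== CLAIM (what is proved, stated in full; the proofs are below) =====
def Claim_equal_needsResolve : Prop := ∀ (expr : Option String), Dom_needsResolve expr → Spec_needsResolve expr (needsResolve expr)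

-- ===== LEMMAS AND PROOFS =====

-- "there is an unescaped '{' at some index ≥ st" (st ≥ 1 at every use)
def hasUnesc (cs : List Char) (st : Nat) : Prop :=
  ∃ i, st ≤ i ∧ cs[i]? = some '{' ∧ cs[i-1]? ≠ some '\\'

theorem singleton_infix_iff_mem {a : Char} {l : List Char} : [a] <:+: l ↔ a ∈ l := by
  constructor
  · intro h; exact List.singleton_sublist.mp h.sublist
  · intro h
    obtain ⟨s, t, rfl⟩ := List.append_of_mem h
    exact ⟨s, t, by simp⟩

theorem singleton_prefix_iff {a : Char} {l : List Char} : [a] <+: l ↔ l.head? = some a := by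
  cases l with
  | nil => simp
  | cons x xs =>
    constructor
    · intro h
      rcases h with ⟨t, ht⟩
      simp at ht
      simp [ht.1]
    · intro h
      simp at h
      exact ⟨xs, by simp [h]⟩

theorem mem_drop_iff_getElem? {a : Char} {l : List Char} {n : Nat} :
    a ∈ l.drop n ↔ ∃ i, n ≤ i ∧ l[i]? = some a := by
  rw [List.mem_iff_getElem?]
  constructor
  · rintro ⟨j, hj⟩
    exact ⟨n + j, Nat.le_add_right _ _, by simpa [List.getElem?_drop] using hj⟩
  · rintro ⟨i, hni, hi⟩
    exact ⟨i - n, by rw [List.getElem?_drop]; rwa [Nat.add_sub_cancel' hni]⟩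

theorem needsResolveGo_iff (fuel : Nat) : ∀ (cs : List Char) (st : Nat),
    1 ≤ st → st ≤ cs.length → cs.length + 1 ≤ fuel + st →
    (needsResolveGo cs fuel st = true ↔ hasUnesc cs st) := by
  induction fuel with
  | zero =>
    intro cs st h1 hle hf
    omega
  | succ fuel ih =>
    intro cs st h1 hle hf
    rw [needsResolveGo]
    by_cases hp : PySem.Chars.findFrom cs ['{'] (st : Int) = -1
    · simp only [hp]
      constructor
      · intro h; exact absurd h (by simp)
      · rintro ⟨i, hsti, hi, _⟩
        have hmem : '{' ∈ cs.drop st := mem_drop_iff_getElem?.mpr ⟨i, hsti, hi⟩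
        have := (PySem.Chars.findFrom_natCast_eq_neg_one_iff cs ['{'] st hle).mp hp
        exact absurd (singleton_infix_iff_mem.mpr hmem) this
    · obtain ⟨hstp, hpre, hmin⟩ := PySem.Chars.findFrom_natCast_spec cs ['{'] st hle hp
      set p := PySem.Chars.findFrom cs ['{'] (st : Int) with hpdef
      have hp0 : 0 ≤ p := le_trans (by exact_mod_cast Nat.zero_le st) hstp
      have hstp' : st ≤ p.toNat := by omega
      have hget : cs[p.toNat]? = some '{' := by
        have := singleton_prefix_iff.mp hpre
        rwa [List.head?_drop] at this
      have hplen : p.toNat < cs.length := (List.getElem?_eq_some_iff.mp hget).1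
      have hmin' : ∀ i, st ≤ i → i < p.toNat → cs[i]? ≠ some '{' := by
        intro i hsti hip hci
        exact hmin i hsti hip (singleton_prefix_iff.mpr (by rwa [List.head?_drop]))
      have hidx : p - 1 = ((p.toNat - 1 : Nat) : Int) := by omega
      have hprev : PySem.List.pyGet? cs (p - 1) = cs[p.toNat - 1]? := by
        rw [hidx, PySem.List.pyGet?_natCast]
      simp only [if_neg hp]
      by_cases hesc : PySem.List.pyGet? cs (p - 1) ≠ some '\\'
      · simp only [if_pos hesc]
        constructor
        · intro _
          exact ⟨p.toNat, hstp', hget, by rwa [← hprev]⟩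
        · exact fun _ => trivial
      · simp only [if_neg hesc]
        rw [not_not] at hesc
        rw [hprev] at hesc
        rw [ih cs (p.toNat + 1) (by omega) (by omega) (by omega)]
        constructor
        · rintro ⟨i, hi1, hi2, hi3⟩
          exact ⟨i, by omega, hi2, hi3⟩
        · rintro ⟨i, hi1, hi2, hi3⟩
          refine ⟨i, ?_, hi2, hi3⟩
          rcases Nat.lt_or_ge i (p.toNat + 1) with hlt | hge
          · rcases Nat.lt_or_ge i p.toNat with hlt' | hge'
            · exact absurd hi2 (hmin' i hi1 hlt')
            · have : i = p.toNat := by omega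
              subst this
              exact absurd hesc (by simpa using hi3)
          · exact hge

-- number of '{' in l
def braceCount : List Char → Nat
  | [] => 0
  | c :: t => (if c = '{' then 1 else 0) + braceCount t

-- number of escaped braces in l, given the character just before l is prev
def escCount (prev : Char) : List Char → Nat
  | [] => 0
  | c :: t => (if c = '{' ∧ prev = '\\' then 1 else 0) + escCount c t

-- number of unescaped braces in l, given the character just before l is prev
def unCount (prev : Char) : List Char → Nat
  | [] => 0
  | c :: t => (if c = '{' ∧ prev ≠ '\\' then 1 else 0) + unCount c t

theorem braceCount_split (l : List Char) : ∀ prev, braceCount l = escCount prev l + unCount prev l := by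
  induction l with
  | nil => intro prev; rfl
  | cons c t ih =>
    intro prev
    simp only [braceCount, escCount, unCount, ih c]
    by_cases hc : c = '{' <;> by_cases hp : prev = '\\' <;> simp [hc, hp] <;> omega

-- count.go for the one-char pattern ['{'] is braceCount
theorem countGo_brace (fuel : Nat) : ∀ (l : List Char) (acc : Nat), l.length ≤ fuel →
    PySem.Chars.count.go ['{'] fuel l acc = acc + braceCount l := by
  induction fuel with
  | zero =>
    intro l acc h
    have : l = [] := List.eq_nil_of_length_eq_zero (by omega)
    subst this; rfl
  | succ fuel ih =>
    intro l acc h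
    cases l with
    | nil => rfl
    | cons c t =>
      rw [PySem.Chars.count.go]
      by_cases hc : c = '{'
      · have hpre : List.isPrefixOf ['{'] (c :: t) = true := by
          simp [List.isPrefixOf, hc]
        rw [if_pos hpre]
        simp only [List.length_singleton, List.drop_succ_cons, List.drop_zero]
        rw [ih t (acc + 1) (by simpa using Nat.lt_succ_iff.mp (by simpa using h))]
        simp [braceCount, hc]; omega
      · have hpre : List.isPrefixOf ['{'] (c :: t) = false := by
          simp [List.isPrefixOf]; exact fun h' => (hc h'.symm).elim
        rw [if_neg (by simp [hpre])]
        rw [ih t acc (by simpa using Nat.lt_succ_iff.mp (by simpa using h))]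
        simp [braceCount, hc]

-- greedy non-overlapping count of the pattern "\{"
def escG : List Char → Nat
  | [] => 0
  | [_] => 0
  | a :: b :: t => if a = '\\' ∧ b = '{' then escG t + 1 else escG (b :: t)

theorem escG_one (c : Char) : escG [c] = 0 := by
  simp [escG]

theorem escG_hit (u : List Char) : escG ('\\' :: '{' :: u) = escG u + 1 := by
  simp [escG]

theorem escG_cons2 (c d : Char) (u : List Char) (h : ¬(c = '\\' ∧ d = '{')) :
    escG (c :: d :: u) = escG (d :: u) := by
  simp only [escG]
  rw [if_neg h]

theorem countGo_esc (fuel : Nat) : ∀ (l : List Char) (acc : Nat), l.length ≤ fuel →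
    PySem.Chars.count.go ['\\', '{'] fuel l acc = acc + escG l := by
  induction fuel with
  | zero =>
    intro l acc h
    have : l = [] := List.eq_nil_of_length_eq_zero (by omega)
    subst this; rfl
  | succ fuel ih =>
    intro l acc h
    cases l with
    | nil => rfl
    | cons c t =>
      rw [PySem.Chars.count.go]
      by_cases hm : c = '\\' ∧ t.head? = some '{'
      · obtain ⟨hc, hh⟩ := hm
        cases t with
        | nil => simp at hh
        | cons d u =>
          simp only [List.head?_cons, Option.some.injEq] at hh
          subst hc; subst hh
          have hpre : List.isPrefixOf ['\\', '{'] ('\\' :: '{' :: u) = true := by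
            simp [List.isPrefixOf]
          rw [if_pos hpre]
          simp only [List.length_cons, List.length_nil, List.drop_succ_cons, List.drop_zero]
          rw [ih u (acc + 1) (by simp at h; omega)]
          rw [escG_hit]
          omega
      · have hpre : List.isPrefixOf ['\\', '{'] (c :: t) = false := by
          cases t with
          | nil => simp [List.isPrefixOf]
          | cons d u =>
            by_cases hc : c = '\\'
            · have hd : d ≠ '{' := by
                intro hd; exact hm ⟨hc, by simp [hd]⟩
              simp [List.isPrefixOf, hc]
              exact fun h' => hd h'.symm
            · simp [List.isPrefixOf]
              intro h'; exact absurd h'.symm hc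
        rw [if_neg (by simp [hpre])]
        rw [ih t acc (by simp at h; omega)]
        have : escG (c :: t) = escG t := by
          cases t with
          | nil => rw [escG_one]; rfl
          | cons d u =>
            have hcd : ¬(c = '\\' ∧ d = '{') := by
              intro ⟨h1, h2⟩; exact hm ⟨h1, by simp [h2]⟩
            exact escG_cons2 c d u hcd
        omega

-- the greedy count equals the sliding-window escaped-brace count (occurrences of "\{" cannot overlap)
theorem escG_eq_aux (n : Nat) : ∀ (t : List Char), t.length ≤ n → ∀ c, escG (c :: t) = escCount c t := by
  induction n with
  | zero =>
    intro t ht c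
    have : t = [] := List.eq_nil_of_length_eq_zero (by omega)
    subst this
    rw [escG_one]; rfl
  | succ n ih =>
    intro t ht c
    cases t with
    | nil => rw [escG_one]; rfl
    | cons d u =>
      by_cases h : c = '\\' ∧ d = '{'
      · obtain ⟨hc, hd⟩ := h
        subst hc; subst hd
        rw [escG_hit]
        have hu : escG u = escCount '{' u := by
          cases u with
          | nil => rfl
          | cons e v =>
            rw [ih v (by simp at ht; omega) e]
            simp [escCount]
        rw [hu]
        simp [escCount]
        omega
      · rw [escG_cons2 c d u h]
        rw [ih u (by simp at ht; omega) d]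
        simp only [escCount]
        rw [if_neg (by intro ⟨h1, h2⟩; exact h ⟨h2, h1⟩)]
        omega

theorem escG_eq_escCount (c : Char) (t : List Char) : escG (c :: t) = escCount c t :=
  escG_eq_aux t.length t (le_refl _) c

-- unCount > 0 iff an unescaped brace exists at some index (with prev the char before the list)
theorem unCount_pos_iff (l : List Char) : ∀ prev : Char,
    (0 < unCount prev l) ↔ ∃ i : Nat, l[i]? = some '{' ∧ (prev :: l)[i]? ≠ some '\\' := by
  induction l with
  | nil => intro prev; simp [unCount]
  | cons c t ih =>
    intro prev
    simp only [unCount]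
    constructor
    · intro h
      by_cases hc : c = '{' ∧ prev ≠ '\\'
      · exact ⟨0, by simp [hc.1], by simpa using hc.2⟩
      · rw [if_neg hc] at h
        simp only [Nat.zero_add] at h
        obtain ⟨i, hi1, hi2⟩ := (ih c).mp h
        exact ⟨i + 1, by simpa using hi1, by simpa using hi2⟩
    · rintro ⟨i, hi1, hi2⟩
      cases i with
      | zero =>
        simp only [List.getElem?_cons_zero, Option.some.injEq] at hi1 hi2
        rw [if_pos ⟨hi1, fun h => hi2 (congrArg some h)⟩]
        omega
      | succ j =>
        simp only [List.getElem?_cons_succ] at hi1 hi2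
        have := (ih c).mpr ⟨j, hi1, hi2⟩
        omega

theorem hasUnesc_iff_unCount (c : Char) (rest : List Char) :
    hasUnesc (c :: rest) 1 ↔ 0 < unCount c rest := by
  rw [unCount_pos_iff]
  constructor
  · rintro ⟨i, hi1, hi2, hi3⟩
    obtain ⟨j, rfl⟩ : ∃ j, i = j + 1 := ⟨i - 1, by omega⟩
    simp only [List.getElem?_cons_succ, Nat.add_sub_cancel] at hi2 hi3
    exact ⟨j, hi2, hi3⟩
  · rintro ⟨j, hj1, hj2⟩
    exact ⟨j + 1, by omega, by simpa using hj1, by simpa using hj2⟩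

-- B's test for a nonempty string, in terms of the structural counters
theorem count_chars_eq (c : Char) (rest : List Char) :
    PySem.Chars.count (c :: rest) ['{'] = braceCount (c :: rest) ∧
    PySem.Chars.count (c :: rest) ['\\', '{'] = escCount c rest := by
  constructor
  · rw [PySem.Chars.count]
    simp only [List.isEmpty_cons, Bool.false_eq_true, if_false]
    rw [countGo_brace _ _ _ (le_refl _)]
    omega
  · rw [PySem.Chars.count]
    simp only [List.isEmpty_cons, Bool.false_eq_true, if_false]
    rw [countGo_esc _ _ _ (le_refl _)]
    rw [escG_eq_escCount]
    omega

-- ===== VERDICT (by name: the statement is the Claim_ definition above) =====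
theorem needsResolve_spec : Claim_equal_needsResolve := by
  intro expr _
  unfold Spec_needsResolve needsResolve needsResolve_alt
  cases expr with
  | none => rfl
  | some s =>
    simp only
    cases hcs : s.toList with
    | nil => simp
    | cons c rest =>
      obtain ⟨hb, he⟩ := count_chars_eq c rest
      have hsplit := braceCount_split rest c
      -- B's value for the nonempty string
      have hBval : (if (c :: rest).isEmpty then false
            else decide (PySem.Chars.count (c :: rest) ['\\', '{'] < PySem.Chars.count (c :: rest) ['{']))
          = decide (escCount c rest < braceCount (c :: rest)) := by
        simp [hb, he]
      rw [hBval]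
      have hget0 : PySem.List.pyGet? (c :: rest) 0 = some c := by
        simp [PySem.List.pyGet?, PySem.List.pyIdx?]
      rw [if_neg (by simp), hget0]
      by_cases hc : c = '{'
      · rw [if_pos (by simp [hc])]
        have : escCount c rest < braceCount (c :: rest) := by
          simp only [braceCount, if_pos hc]
          omega
        simp [this]
      · rw [if_neg (by simpa using hc)]
        have hbc : braceCount (c :: rest) = braceCount rest := by
          simp [braceCount, hc]
        cases rest with
        | nil =>
          rw [if_pos (by simp)]
          simp [braceCount, escCount, hc]
        | cons d ds =>
          rw [if_neg (by simp)]
          rw [Bool.eq_iff_iff]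
          rw [needsResolveGo_iff _ _ _ (by omega) (by simp) (by simp)]
          rw [hasUnesc_iff_unCount]
          rw [hbc]
          rw [braceCount_split (d :: ds) c]
          simp only [decide_eq_true_eq]
          omega
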